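-- pv_equiv track=rewrite | github.com/welmends/bizingo-sockets-py | main.py | generate_triangles_type_2
-- ===== SOURCE A (Python) =====
-- def generate_triangles_type_2(base_x, base_y, size):
--     triangles_type_2 = []
--     amount = [9,10,11,10,9,8,7,6,5,4,3] # Fixed
--     a = b = c = d = e = f = 0
--     a = base_x - size
--     b = base_y - (size-10)
--     for triangles in amount:
--         a = base_x - int(size/2)*(1+(triangles-amount[0]))
--         b = b + (size-10)
--         for triangle in range(triangles):
--             a = a + size
--             c = a + int(size/2)
--             d = b + (size-10)
--             e = a + size
--             f = b
--
--             triangles_type_2.append([a,b,c,d,e,f])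
--     return triangles_type_2
-- ===== SOURCE B (Python) =====
-- def generate_triangles_type_2(base_x, base_y, size):
--     # Flat single loop over a global triangle index k; the row is recovered by
--     # binary search in a prefix-sum table, and coordinates are closed-form in (row, col).
--     amount = [9, 10, 11, 10, 9, 8, 7, 6, 5, 4, 3]
--     starts = []
--     total = 0
--     for t in amount:
--         starts.append(total)
--         total += t
--     h = int(size / 2)
--     out = []
--     for k in range(total):
--         lo, hi = 0, len(starts) - 1
--         while lo < hi:
--             mid = (lo + hi + 1) // 2
--             if starts[mid] <= k:
--                 lo = mid
--             else:
--                 hi = mid - 1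
--         i = lo
--         j = k - starts[i]
--         t = amount[i]
--         a = base_x - h * (t - 8) + size * (j + 1)
--         b = base_y + i * (size - 10)
--         out.append([a, b, a + h, b + (size - 10), a + size, b])
--     return out
-- ===== Notes on version B (the rewrite author's own statement) =====
-- stated objective: alternative
-- what changed: Replaced the nested row/column loops with mutated accumulators by a single flat loop over a global triangle index: a prefix-sum table of the row sizes is built once, each index is mapped to its row by binary search, and every coordinate is a closed-form function of (row, column).
import Mathlib
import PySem

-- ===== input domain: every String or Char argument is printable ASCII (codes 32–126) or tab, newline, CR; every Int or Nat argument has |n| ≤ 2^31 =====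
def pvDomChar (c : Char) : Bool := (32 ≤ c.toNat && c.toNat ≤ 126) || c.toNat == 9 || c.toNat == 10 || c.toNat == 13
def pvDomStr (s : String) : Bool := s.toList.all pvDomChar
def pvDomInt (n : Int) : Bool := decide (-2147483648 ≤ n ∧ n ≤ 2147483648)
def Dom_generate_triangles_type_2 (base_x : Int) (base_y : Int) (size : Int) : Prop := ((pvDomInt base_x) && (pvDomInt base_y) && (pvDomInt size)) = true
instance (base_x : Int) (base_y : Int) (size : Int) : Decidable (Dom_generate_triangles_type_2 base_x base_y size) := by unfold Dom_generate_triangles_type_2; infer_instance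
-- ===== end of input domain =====

-- B replaces A's nested loops with mutated accumulators by one flat loop over a global
-- triangle index, with a prefix-sum table and binary search for the row (objective: alternative).
-- int(size/2) is exact truncating division (Int.tdiv) for |size| ≤ 2^31.

-- ===== PORT A =====
-- state: (a, b, acc); inner loop mutates a and acc, outer loop resets a and advances b
def generate_triangles_type_2 (base_x : Int) (base_y : Int) (size : Int) : List (List Int) :=
  let amount : List Int := [9, 10, 11, 10, 9, 8, 7, 6, 5, 4, 3]
  let a0 := base_x - size
  let b0 := base_y - (size - 10)
  let st := amount.foldl (fun (st : Int × Int × List (List Int)) triangles =>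
      let a := base_x - (Int.tdiv size 2) * (1 + (triangles - amount.headI))
      let b := st.2.1 + (size - 10)
      let inner := (PySem.List.pyRange 0 triangles 1).foldl
        (fun (st2 : Int × List (List Int)) _ =>
          let a := st2.1 + size
          let c := a + Int.tdiv size 2
          let d := b + (size - 10)
          let e := a + size
          let f := b
          (a, st2.2 ++ [[a, b, c, d, e, f]])) (a, st.2.2)
      (inner.1, b, inner.2)) (a0, b0, [])
  st.2.2

-- ===== PORT B =====
-- the Python while-loop binary search, ported as recursion decreasing on hi - lo
def pvBSearch (starts : List Int) (k : Int) (lo hi : Nat) : Nat :=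
  if lo < hi then
    let mid := (lo + hi + 1) / 2
    if starts.getD mid 0 ≤ k then pvBSearch starts k mid hi
    else pvBSearch starts k lo (mid - 1)
  else lo
termination_by hi - lo
decreasing_by all_goals omega

def generate_triangles_type_2_alt (base_x : Int) (base_y : Int) (size : Int) : List (List Int) :=
  let amount : List Int := [9, 10, 11, 10, 9, 8, 7, 6, 5, 4, 3]
  let stP := amount.foldl (fun (st : List Int × Int) t => (st.1 ++ [st.2], st.2 + t)) ([], 0)
  let starts := stP.1
  let total := stP.2
  let h := Int.tdiv size 2
  (PySem.List.pyRange 0 total 1).foldl (fun out k =>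
    let i := pvBSearch starts k 0 (starts.length - 1)
    let j := k - starts.getD i 0
    let t := amount.getD i 0
    let a := base_x - h * (t - 8) + size * (j + 1)
    let b := base_y + (i : Int) * (size - 10)
    out ++ [[a, b, a + h, b + (size - 10), a + size, b]]) []

-- ===== PRECONDITION & SPEC =====
def Spec_generate_triangles_type_2 (base_x : Int) (base_y : Int) (size : Int) (out : List (List Int)) : Prop := out = generate_triangles_type_2_alt base_x base_y size
instance (base_x : Int) (base_y : Int) (size : Int) (out : List (List Int)) : Decidable (Spec_generate_triangles_type_2 base_x base_y size out) := by unfold Spec_generate_triangles_type_2; infer_instance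

-- ===== CLAIM (what is proved, stated in full; the proofs are below) =====
def Claim_equal_generate_triangles_type_2 : Prop := ∀ (base_x : Int) (base_y : Int) (size : Int), Dom_generate_triangles_type_2 base_x base_y size → Spec_generate_triangles_type_2 base_x base_y size (generate_triangles_type_2 base_x base_y size)

-- ===== LEMMAS AND PROOFS =====

-- ===== VERDICT (by name: the statement is the Claim_ definition above) =====
set_option maxHeartbeats 4000000 in
theorem generate_triangles_type_2_spec : Claim_equal_generate_triangles_type_2 := by
  intro base_x base_y size _
  unfold Spec_generate_triangles_type_2 generate_triangles_type_2 generate_triangles_type_2_alt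
  set_option maxRecDepth 100000 in
  simp [pvBSearch, PySem.List.pyRange_one, List.range_succ, List.getD]
  set_option maxRecDepth 100000 in
  ring_nf
  simp
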